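-- pv_equiv track=rewrite | github.com/btrkeks/transcoda | src/core/kern_utils.py | extract_pitch
-- ===== SOURCE A (Python) =====
-- def extract_pitch(token: str) -> str | None:
--     """Extract the pitch part from a **kern note token.
--
--     Args:
--         token: A single **kern note/rests token delimited by spaces
--
--     Returns:
--         The pitch part of the token, or None if not a valid note/rests token
--     """
--     # Strip leading tie markers ([, ]) and slur markers ((, ))
--     token = token.lstrip("[]()")
--     n = len(token)
--     i = 0
--
--     # 1) Skip leading duration digits and augmentation dots (e.g., '16', '4.')
--     while i < n and (token[i].isdigit() or token[i] == "."):
--         i += 1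
--
--     # 2) Collect consecutive pitch letters (octave via repetition)
--     j = i
--     while j < n and ("A" <= token[j] <= "G" or "a" <= token[j] <= "g"):
--         j += 1
--     if j == i:
--         return None  # no pitch letters present
--
--     # 3) Collect accidentals immediately following the pitch
--     k = j
--     while k < n and token[k] in {"#", "-", "n"}:
--         k += 1
--
--     pitch = token[i:k] if k > i else None
--     return pitch
-- ===== SOURCE B (Python) =====
-- def extract_pitch(token: str) -> str | None:
--     """Extract the pitch part from a **kern note token.
--
--     Single-pass finite-state machine: one loop over the characters with a
--     state (0 = duration prefix, 1 = pitch letters, 2 = accidentals) and an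
--     accumulator, instead of three staged index-walking scans.
--     """
--     state = 0
--     out = []
--     for c in token.lstrip("[]()"):
--         if state == 0:
--             if "0" <= c <= "9" or c == ".":
--                 continue
--             state = 1
--         if state == 1:
--             if "A" <= c <= "G" or "a" <= c <= "g":
--                 out.append(c)
--                 continue
--             if not out:
--                 return None
--             state = 2
--         if c in "#-n":
--             out.append(c)
--         else:
--             break
--     return "".join(out) if out else None
-- ===== Notes on version B (the rewrite author's own statement) =====
-- stated objective: alternative
-- what changed: Replaces A's three staged index-walking while-loops (skip duration, collect letters, collect accidentals, then slice by indices) with one single-pass finite-state machine over the characters that accumulates the pitch directly.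
import Mathlib
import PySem

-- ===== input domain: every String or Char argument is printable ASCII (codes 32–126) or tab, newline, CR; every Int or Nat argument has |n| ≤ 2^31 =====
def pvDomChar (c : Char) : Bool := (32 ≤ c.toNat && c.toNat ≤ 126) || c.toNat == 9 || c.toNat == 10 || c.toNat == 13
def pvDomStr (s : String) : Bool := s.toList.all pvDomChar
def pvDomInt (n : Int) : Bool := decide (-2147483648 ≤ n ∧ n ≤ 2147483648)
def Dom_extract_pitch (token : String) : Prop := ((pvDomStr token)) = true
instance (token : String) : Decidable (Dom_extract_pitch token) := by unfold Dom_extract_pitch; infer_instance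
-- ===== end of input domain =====

-- B replaces A's three staged index-walking scans by a single-pass finite-state machine
-- (state duration/pitch/accidentals) with an accumulator (idiomatic; same cost).

-- ===== PORT A =====
-- Python str.lstrip(chars): drop leading characters belonging to the set `chars` (exact for ASCII sets)
def pvLstrip (cs : List Char) (chars : List Char) : List Char :=
  cs.dropWhile (fun c => chars.contains c)

-- one index-advancing `while i < n and p(token[i]): i += 1` loop of A
def pvWalk (t : List Char) (p : Char → Bool) (i : Nat) : Nat :=
  if i < t.length ∧ p (t.getD i ' ') then pvWalk t p (i + 1) else i
termination_by t.length - i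
decreasing_by omega

def extract_pitch (token : String) : Option String :=
  let t := pvLstrip token.toList ['[', ']', '(', ')']
  let i := pvWalk t (fun c => PySem.Chars.isdigit c || c == '.') 0
  let j := pvWalk t (fun c => (decide ('A' ≤ c) && decide (c ≤ 'G')) || (decide ('a' ≤ c) && decide (c ≤ 'g'))) i
  if j = i then none
  else
    let k := pvWalk t (fun c => ['#', '-', 'n'].contains c) j
    if k > i then some (String.ofList (PySem.List.slice t (some (i : Int)) (some (k : Int)))) else none

-- ===== PORT B =====
-- Source B's three character tests: '0' <= c <= '9' or c == '.', 'A' <= c <= 'G' or 'a' <= c <= 'g', c in "#-n"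
def pvPd (c : Char) : Bool := (decide ('0' ≤ c) && decide (c ≤ '9')) || c == '.'
def pvPl (c : Char) : Bool := (decide ('A' ≤ c) && decide (c ≤ 'G')) || (decide ('a' ≤ c) && decide (c ≤ 'g'))
def pvPa (c : Char) : Bool := (['#', '-', 'n'] : List Char).contains c

-- the `for c in …` loop of Source B: state 0 = duration prefix, 1 = pitch letters, 2 = accidentals;
-- `out` is the accumulator list Source B appends to; `none` is the early `return None`
def pvFsm : List Char → Nat → List Char → Option String
  | [], _, out => if out = [] then none else some (String.ofList out)
  | c :: cs, state, out =>
    if state == 0 && pvPd c then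
      pvFsm cs state out
    else
      let state := if state == 0 then 1 else state
      if state == 1 && pvPl c then
        pvFsm cs state (out ++ [c])
      else if state == 1 && out == ([] : List Char) then none
      else
        let state := if state == 1 then 2 else state
        if pvPa c then pvFsm cs state (out ++ [c])
        else if out = [] then none else some (String.ofList out)

def extract_pitch_alt (token : String) : Option String :=
  pvFsm (pvLstrip token.toList ['[', ']', '(', ')']) 0 []

-- ===== PRECONDITION & SPEC =====
def Spec_extract_pitch (token : String) (out : Option String) : Prop := out = extract_pitch_alt token
instance (token : String) (out : Option String) : Decidable (Spec_extract_pitch token out) := by unfold Spec_extract_pitch; infer_instance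

-- ===== CLAIM =====
def Claim_equal_extract_pitch : Prop := ∀ (token : String), Dom_extract_pitch token → Spec_extract_pitch token (extract_pitch token)

-- ===== LEMMAS AND PROOFS =====

theorem pvWalk_eq (t : List Char) (p : Char → Bool) (i : Nat) :
    pvWalk t p i = i + ((t.drop i).takeWhile p).length := by
  rw [pvWalk]
  split
  · rename_i h
    obtain ⟨hlt, hp⟩ := h
    rw [pvWalk_eq t p (i + 1)]
    have hd : t.drop i = t[i] :: t.drop (i + 1) := by
      rw [List.drop_eq_getElem_cons hlt]
    have hgd : t.getD i ' ' = t[i] := by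
      simp [List.getD, List.getElem?_eq_getElem hlt]
    rw [hd, List.takeWhile_cons, ← hgd, hp]
    simp; omega
  · rename_i h
    by_cases hlt : i < t.length
    · have hp : p (t.getD i ' ') = false := by
        cases hq : p (t.getD i ' ') with
        | false => rfl
        | true => exact absurd ⟨hlt, hq⟩ h
      have hd : t.drop i = t[i] :: t.drop (i + 1) := by
        rw [List.drop_eq_getElem_cons hlt]
      have hgd : t.getD i ' ' = t[i] := by
        simp [List.getD, List.getElem?_eq_getElem hlt]
      rw [hd, List.takeWhile_cons, ← hgd, hp]
      simp
    · rw [List.drop_eq_nil_of_le (by omega)]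
      simp
termination_by t.length - i
decreasing_by omega

-- A's digit test agrees with B's range test
theorem pd_eq :
    (fun c => PySem.Chars.isdigit c || c == '.') =
      (fun c => (decide ('0' ≤ c) && decide (c ≤ '9')) || c == '.') := by
  funext c
  simp [PySem.Chars.isdigit]

-- state 2 of the FSM collects the accidental prefix
theorem pvFsm_two (cs : List Char) (out : List Char) (h : out ≠ []) :
    pvFsm cs 2 out = some (String.ofList (out ++ cs.takeWhile pvPa)) := by
  induction cs generalizing out with
  | nil => simp [pvFsm, h]
  | cons c cs ih =>
    rw [pvFsm]
    cases hc : pvPa c with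
    | true => simp [hc, ih (out ++ [c]) (by simp)]
    | false => simp [h, hc]

-- state 1 of the FSM collects the pitch letters then hands over to state 2
theorem pvFsm_one (cs : List Char) (out : List Char) (h : out ≠ []) :
    pvFsm cs 1 out =
      some (String.ofList (out ++ cs.takeWhile pvPl ++ (cs.dropWhile pvPl).takeWhile pvPa)) := by
  induction cs generalizing out with
  | nil => simp [pvFsm, h]
  | cons c cs ih =>
    rw [pvFsm]
    cases hc : pvPl c with
    | true => simp [hc, ih (out ++ [c]) (by simp)]
    | false =>
      cases ha : pvPa c with
      | true =>
        simp [h, hc, ha, pvFsm_two cs (out ++ [c]) (by simp)]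
      | false => simp [h, hc, ha]

-- state 0 of the FSM: skip the duration prefix, then the whole result
theorem pvFsm_zero (cs : List Char) :
    pvFsm cs 0 [] =
      if (cs.dropWhile pvPd).takeWhile pvPl = [] then none
      else some (String.ofList ((cs.dropWhile pvPd).takeWhile pvPl ++
        (((cs.dropWhile pvPd)).dropWhile pvPl).takeWhile pvPa)) := by
  induction cs with
  | nil => simp [pvFsm]
  | cons c cs ih =>
    rw [pvFsm]
    cases hd : pvPd c with
    | true => simpa [hd] using ih
    | false =>
      cases hl : pvPl c with
      | true =>
        simp [hd, hl, pvFsm_one cs [c] (by simp)]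
      | false => simp [hd, hl]

-- dropping the length of the takeWhile-prefix is dropWhile
theorem drop_length_takeWhile (p : Char → Bool) (l : List Char) :
    l.drop (l.takeWhile p).length = l.dropWhile p := by
  induction l with
  | nil => simp
  | cons a l ih =>
    by_cases h : p a <;> simp [h, ih]

theorem take_length_takeWhile (p : Char → Bool) (l : List Char) :
    l.take (l.takeWhile p).length = l.takeWhile p := by
  induction l with
  | nil => simp
  | cons a l ih =>
    by_cases h : p a <;> simp [h, ih]

theorem take_tw_add (p : Char → Bool) (l : List Char) (m : Nat) :
    l.take ((l.takeWhile p).length + m) = l.takeWhile p ++ (l.dropWhile p).take m := by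
  induction l with
  | nil => simp
  | cons a l ih =>
    by_cases h : p a <;> simp [h, ih, Nat.succ_add]

-- ===== VERDICT (by name: the statement is the Claim_ definition above) =====
theorem extract_pitch_spec : Claim_equal_extract_pitch := by
  intro token _
  unfold Spec_extract_pitch extract_pitch extract_pitch_alt
  simp only [pvWalk_eq, pd_eq, List.drop_zero, Nat.zero_add]
  set t := pvLstrip token.toList ['[', ']', '(', ')'] with ht
  rw [pvFsm_zero]
  rw [show (fun c => (decide ('0' ≤ c) && decide (c ≤ '9')) || c == '.') = pvPd from rfl,
    show (fun c => (decide ('A' ≤ c) && decide (c ≤ 'G')) || (decide ('a' ≤ c) && decide (c ≤ 'g'))) = pvPl from rfl,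
    show (fun c => (['#', '-', 'n'] : List Char).contains c) = pvPa from rfl]
  rw [drop_length_takeWhile]
  set body := t.dropWhile pvPd with hb
  set L := (body.takeWhile pvPl).length with hL
  by_cases hz : L = 0
  · have hnil : body.takeWhile pvPl = [] := List.length_eq_zero_iff.mp hz
    simp [hz, hnil]
  · have hBne : ¬ body.takeWhile pvPl = [] := by
      intro hcon
      exact hz (by rw [hL, hcon]; rfl)
    rw [if_neg (show (t.takeWhile pvPd).length + L ≠ (t.takeWhile pvPd).length by omega)]
    have hdropj : t.drop ((t.takeWhile pvPd).length + L) = body.dropWhile pvPl := by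
      rw [← List.drop_drop, drop_length_takeWhile, hL, drop_length_takeWhile]
    rw [hdropj]
    set M := ((body.dropWhile pvPl).takeWhile pvPa).length with hM
    rw [if_pos (show (t.takeWhile pvPd).length + L + M > (t.takeWhile pvPd).length by omega),
      if_neg hBne]
    congr 1
    rw [PySem.List.slice_natCast, drop_length_takeWhile, ← hb]
    have harith : ((t.takeWhile pvPd).length + L + M) - (t.takeWhile pvPd).length = L + M := by
      omega
    rw [harith, hL, take_tw_add, hM, take_length_takeWhile]
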